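-- pv_equiv track=rewrite | github.com/nasimakea/DSA | insertion_sorting_problem.py | insert_sorter
-- ===== SOURCE A (Python) =====
-- def insert_sorter(a):
--   count=0
--   n=len(a)
--   for i in range(1,n):
--     key=a[i]
--     j=i-1
--     count +=1
--     while j >=0 and key <a[j]:
--
--       a[j+1]=a[j]
--       j-=1
--     a[j+1]=key
--
--   return(a,count)
-- ===== SOURCE B (Python) =====
-- def insert_sorter(a):
--     return (sorted(a), max(len(a) - 1, 0))
-- ===== Notes on version B (the rewrite author's own statement) =====
-- stated objective: faster
-- what changed: Replaces the hand-written O(n^2) in-place insertion sort by the built-in sorted() plus the closed-form outer-loop count max(n-1,0); note A mutates its argument in place while B does not (return-value equivalence).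
import Mathlib
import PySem

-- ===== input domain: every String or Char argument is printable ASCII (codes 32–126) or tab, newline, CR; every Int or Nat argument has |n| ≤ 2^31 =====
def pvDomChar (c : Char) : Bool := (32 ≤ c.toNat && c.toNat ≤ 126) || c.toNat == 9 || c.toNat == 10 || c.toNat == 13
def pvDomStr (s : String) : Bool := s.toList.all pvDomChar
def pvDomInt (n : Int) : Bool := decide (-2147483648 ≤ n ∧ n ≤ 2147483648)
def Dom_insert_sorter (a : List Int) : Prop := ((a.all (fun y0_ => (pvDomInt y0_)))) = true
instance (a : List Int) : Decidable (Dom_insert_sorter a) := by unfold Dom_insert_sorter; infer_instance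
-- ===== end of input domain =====

-- B replaces A's O(n^2) in-place insertion sort by the built-in sorted() plus the closed-form
-- outer-loop count max(n-1, 0); A mutates its argument in place, B does not — the equivalence
-- proved here is about the RETURN value.

-- ===== PORT A =====
-- the 'while j >= 0 and key < a[j]: a[j+1] = a[j]; j -= 1' loop; inside the loop 0 ≤ j, so
-- j and j+1 are nonnegative in-range indices and pyGetD / .toNat-set are exact here
def innerShift (a : List Int) (key : Int) (j : Int) : List Int × Int :=
  if h : 0 ≤ j ∧ key < PySem.List.pyGetD a j 0 then
    innerShift (a.set (j + 1).toNat (PySem.List.pyGetD a j 0)) key (j - 1)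
  else (a, j)
termination_by (j + 1).toNat
decreasing_by omega

def insert_sorter (a : List Int) : List Int × Int :=
  (PySem.List.pyRange 1 (PySem.List.len a) 1).foldl
    (fun st i =>
      let key := PySem.List.pyGetD st.1 i 0
      let j := i - 1
      let count := st.2 + 1
      let r := innerShift st.1 key j
      (r.1.set (r.2 + 1).toNat key, count))   -- a[j+1] = key after the while loop
    (a, 0)

-- ===== PORT B =====
def insert_sorter_alt (a : List Int) : List Int × Int :=
  (PySem.List.sorted a (fun x => x) false, max ((PySem.List.len a) - 1) 0)

-- ===== PRECONDITION & SPEC =====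
def Spec_insert_sorter (a : List Int) (out : List Int × Int) : Prop := out = insert_sorter_alt a
instance (a : List Int) (out : List Int × Int) : Decidable (Spec_insert_sorter a out) := by unfold Spec_insert_sorter; infer_instance

-- ===== CLAIM (what is proved, stated in full; the proofs are below) =====
def Claim_equal_insert_sorter : Prop := ∀ (a : List Int), Dom_insert_sorter a → Spec_insert_sorter a (insert_sorter a)

-- ===== LEMMAS AND PROOFS =====

-- insertion "from the right" on a REVERSED prefix: scan left past elements > key, drop key
-- after the first element ≤ key — exactly what A's shifting while-loop computes
def insRevAux : List Int → Int → List Int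
  | [], key => [key]
  | x :: rest, key => if key < x then insRevAux rest key ++ [x] else rest.reverse ++ [x, key]

def insR (p : List Int) (key : Int) : List Int := insRevAux p.reverse key

theorem insR_append_lt (q : List Int) (x k : Int) (h : k < x) :
    insR (q ++ [x]) k = insR q k ++ [x] := by
  simp [insR, insRevAux, h]

theorem insR_append_ge (q : List Int) (x k : Int) (h : ¬ k < x) :
    insR (q ++ [x]) k = q ++ [x, k] := by
  simp [insR, insRevAux, h]

theorem insRevAux_perm (rp : List Int) (k : Int) :
    (insRevAux rp k).Perm (k :: rp.reverse) := by
  induction rp with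
  | nil => simp [insRevAux]
  | cons x rest ih =>
    simp only [insRevAux]
    split
    · rw [List.reverse_cons]
      exact ih.append_right [x]
    · have h1 : rest.reverse ++ [x, k] = (rest.reverse ++ [x]) ++ [k] := by simp
      rw [h1, List.reverse_cons]
      exact List.perm_append_comm

theorem insR_perm (p : List Int) (k : Int) : (insR p k).Perm (k :: p) := by
  simpa [insR] using insRevAux_perm p.reverse k

theorem mem_insR {p : List Int} {k y : Int} (h : y ∈ insR p k) : y = k ∨ y ∈ p := by
  have := (insR_perm p k).mem_iff.mp h
  simpa using this

theorem insR_pairwise (p : List Int) (k : Int) (h : p.Pairwise (· ≤ ·)) :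
    (insR p k).Pairwise (· ≤ ·) := by
  induction p using List.reverseRecOn with
  | nil => simp [insR, insRevAux]
  | append_singleton q x ih =>
    rw [List.pairwise_append] at h
    obtain ⟨hq, -, hqx⟩ := h
    have hx : ∀ y ∈ q, y ≤ x := fun y hy => hqx y hy x (by simp)
    by_cases hlt : k < x
    · rw [insR_append_lt q x k hlt]
      rw [List.pairwise_append]
      refine ⟨ih hq, by simp, ?_⟩
      intro y hy z hz
      simp only [List.mem_singleton] at hz
      rw [hz]
      rcases mem_insR hy with rfl | hyq
      · exact le_of_lt hlt
      · exact hx y hyq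
    · rw [insR_append_ge q x k hlt]
      rw [List.pairwise_append]
      refine ⟨hq, ?_, ?_⟩
      · refine List.Pairwise.cons ?_ (by simp)
        intro z hz
        simp only [List.mem_singleton] at hz
        rw [hz]
        omega
      · intro y hy z hz
        simp only [List.mem_cons, List.not_mem_nil, or_false] at hz
        rcases hz with h1 | h1 <;> rw [h1]
        · exact hx y hy
        · exact le_trans (hx y hy) (by omega)

-- the inner while-loop followed by the final 'a[j+1] = key' write is exactly insR on the
-- prefix before position p.length (whose stale content s is never read)
theorem inner_spec (p : List Int) (t : List Int) (s key : Int) :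
    (let r := innerShift (p ++ s :: t) key ((p.length : Int) - 1)
     r.1.set (r.2 + 1).toNat key) = insR p key ++ t := by
  induction p using List.reverseRecOn generalizing t s with
  | nil =>
    rw [innerShift]
    simp [insR, insRevAux]
  | append_singleton q x ih =>
    have hlen : ((q ++ [x]).length : Int) - 1 = (q.length : Int) := by simp
    have hget : PySem.List.pyGetD ((q ++ [x]) ++ s :: t) ((q.length : Int)) 0 = x := by
      have : (q ++ [x]) ++ s :: t = q ++ x :: (s :: t) := by simp
      rw [this]
      simp [PySem.List.pyGetD_natCast]
    rw [innerShift, hlen, hget]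
    by_cases hlt : key < x
    · rw [dif_pos ⟨Int.natCast_nonneg _, hlt⟩]
      have hset : ((q ++ [x]) ++ s :: t).set ((q.length : Int) + 1).toNat x
          = q ++ x :: (x :: t) := by
        have h1 : ((q.length : Int) + 1).toNat = (q ++ [x]).length := by simp
        rw [h1]
        simp
      rw [hset]
      have := ih (t := x :: t) (s := x)
      rw [insR_append_lt q x key hlt]
      simp only at this ⊢
      rw [this]
      simp
    · rw [dif_neg (by tauto)]
      have h1 : ((q.length : Int) + 1).toNat = (q ++ [x]).length := by simp
      simp only [h1]
      rw [insR_append_ge q x key hlt]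
      simp

-- stable insertion sort as a fold of insR
def sIns (xs : List Int) : List Int := xs.foldl (fun acc x => insR acc x) []

theorem sIns_append_singleton (xs : List Int) (x : Int) :
    sIns (xs ++ [x]) = insR (sIns xs) x := by
  simp [sIns, List.foldl_append]

theorem sIns_perm (xs : List Int) : (sIns xs).Perm xs := by
  induction xs using List.reverseRecOn with
  | nil => rfl
  | append_singleton q x ih =>
    rw [sIns_append_singleton]
    refine List.Perm.trans (insR_perm _ _) (List.Perm.trans (ih.cons x) ?_)
    simpa using (List.perm_append_comm (l₁ := [x]) (l₂ := q))

theorem sIns_pairwise (xs : List Int) : (sIns xs).Pairwise (· ≤ ·) := by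
  induction xs using List.reverseRecOn with
  | nil => simp [sIns]
  | append_singleton q x ih =>
    rw [sIns_append_singleton]
    exact insR_pairwise _ _ ih

theorem sIns_length (xs : List Int) : (sIns xs).length = xs.length :=
  (sIns_perm xs).length_eq

-- loop invariant of A's outer for-loop: after the iterations i = 1..k-1 the first k elements
-- are sorted (stably, = sIns of the original prefix), the rest untouched, and count = k-1
theorem outer_inv (a : List Int) (k : Nat) (h1 : 1 ≤ k) (h2 : k ≤ a.length) :
    (PySem.List.pyRange 1 (k : Int) 1).foldl
      (fun st i =>
        let key := PySem.List.pyGetD st.1 i 0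
        let j := i - 1
        let count := st.2 + 1
        let r := innerShift st.1 key j
        (r.1.set (r.2 + 1).toNat key, count)) (a, 0)
    = (sIns (a.take k) ++ a.drop k, (k : Int) - 1) := by
  induction k with
  | zero => omega
  | succ k ih =>
    by_cases hk : k = 0
    · subst hk
      rw [PySem.List.pyRange_one_eq_nil (by norm_num)]
      obtain ⟨h, t, rfl⟩ : ∃ h t, a = h :: t := by
        cases a with
        | nil => simp at h2
        | cons h t => exact ⟨h, t, rfl⟩
      simp [sIns, insR, insRevAux]
    · have hk1 : 1 ≤ k := by omega
      have hklen : k < a.length := by omega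
      have hsplit : PySem.List.pyRange 1 ((k : Int) + 1) 1
          = PySem.List.pyRange 1 (k : Int) 1 ++ [(k : Int)] :=
        PySem.List.pyRange_one_succ_right (by omega)
      push_cast
      rw [hsplit, List.foldl_append, ih hk1 (by omega)]
      simp only [List.foldl_cons, List.foldl_nil]
      have hdrop : a.drop k = a[k] :: a.drop (k + 1) := List.drop_eq_getElem_cons hklen
      have hSlen : (sIns (a.take k)).length = k := by
        rw [sIns_length, List.length_take]; omega
      rw [hdrop]
      rw [show (k : Int) = ((sIns (a.take k)).length : Int) from by rw [hSlen]]
      have hget : PySem.List.pyGetD (sIns (a.take k) ++ a[k] :: a.drop (k + 1))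
          ((sIns (a.take k)).length : Int) 0 = a[k] := by
        simp [PySem.List.pyGetD_natCast, hklen]
      rw [hget]
      have hspec := inner_spec (sIns (a.take k)) (a.drop (k + 1)) (a[k]) (a[k])
      simp only at hspec ⊢
      rw [hspec]
      have htake : a.take (k + 1) = a.take k ++ [a[k]] := List.take_succ_eq_append_getElem hklen
      rw [htake, sIns_append_singleton]
      simp only [Prod.mk.injEq, true_and]
      rw [hSlen]
      omega

-- ===== VERDICT (by name: the statement is the Claim_ definition above) =====
theorem insert_sorter_spec : Claim_equal_insert_sorter := by
  intro a _
  unfold Spec_insert_sorter insert_sorter insert_sorter_alt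
  cases a with
  | nil => decide
  | cons h t =>
    have hlen : PySem.List.len (h :: t) = ((h :: t).length : Int) := by
      simp [PySem.List.len_eq]
    rw [hlen]
    rw [outer_inv (h :: t) (h :: t).length (by simp) le_rfl]
    have hs : PySem.List.sorted (h :: t) (fun x => x) false = sIns (h :: t) :=
      PySem.List.sorted_id_eq_of_perm_of_pairwise (h :: t) (sIns (h :: t))
        (sIns_perm _) (sIns_pairwise _)
    rw [hs]
    have hmax : max (((h :: t).length : Int) - 1) 0 = ((h :: t).length : Int) - 1 := by
      have : (0:Int) ≤ ((h :: t).length : Int) - 1 := by simp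
      omega
    rw [hmax]
    simp
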